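-- pv_equiv track=rewrite | github.com/A-janjan/preparations | python/interview/implements/Algorithm/format_license_key.py | format_license_key
-- ===== SOURCE A (Python) =====
-- def format_license_key(s, k):
--     s = s.replace("-", "").upper()
--     first_group_size = len(s) % k
--     result = s[:first_group_size]
--
--     for i in range(first_group_size, len(s), k):
--         if i > 0:
--             result += "-"
--         result += s[i:i+k]
--
--     return result
-- ===== SOURCE B (Python) =====
-- def format_license_key(s, k):
--     s = s.replace("-", "").upper()
--
--     def go(t):
--         # divide and conquer: split t at a group boundary counted from the right
--         if len(t) <= k:
--             return t
--         groups = -(-len(t) // k)          # ceil(len(t) / k) = number of dash groups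
--         left = len(t) - (groups // 2) * k # right half holds groups//2 full k-groups
--         return go(t[:left]) + "-" + go(t[left:])
--
--     return go(s) if s else ""
-- ===== Notes on version B (the rewrite author's own statement) =====
-- stated objective: alternative
-- what changed: A's single forward loop with a running index, modulus-computed leading group and per-iteration dash test is replaced by a recursive divide-and-conquer: the cleaned string is split at a group boundary counted from the right (right half = groups//2 full k-groups) and the two halves are formatted recursively and joined with one dash.
-- outside the precondition, e.g. on format_license_key('abc', -2): A returns 'AB', B raises RecursionError; on format_license_key('abc', 0): A raises ZeroDivisionError, B raises ZeroDivisionError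
import Mathlib
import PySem

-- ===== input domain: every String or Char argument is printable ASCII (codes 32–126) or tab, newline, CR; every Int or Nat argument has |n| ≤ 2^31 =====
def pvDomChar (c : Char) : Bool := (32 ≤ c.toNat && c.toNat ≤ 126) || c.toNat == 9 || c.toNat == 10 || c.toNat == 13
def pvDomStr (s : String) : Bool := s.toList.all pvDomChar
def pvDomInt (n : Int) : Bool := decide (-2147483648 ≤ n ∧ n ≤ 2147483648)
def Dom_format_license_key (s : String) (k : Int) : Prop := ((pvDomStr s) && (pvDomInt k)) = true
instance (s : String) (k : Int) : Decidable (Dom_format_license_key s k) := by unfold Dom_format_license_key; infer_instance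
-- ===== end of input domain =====

-- B replaces A's forward index loop (modulus leading group, per-iteration dash test) by a
-- recursive divide-and-conquer that splits the cleaned string at a group boundary from the right
-- and joins the two recursively formatted halves with one dash (alternative decomposition, same value).


-- ===== PORT A =====
-- A after the cleaning step, on code points: result = s[:first]; for i in range(first, len(s), k): if i > 0: result += "-"; result += s[i:i+k]
def fkAcore (t : List Char) (k : Int) : List Char :=
  let first := PySem.Int.mod (PySem.Chars.len t) k
  (PySem.List.pyRange first (PySem.Chars.len t) k).foldl
    (fun r i => (if 0 < i then r ++ ['-'] else r) ++ PySem.Chars.slice t (some i) (some (i + k)))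
    (PySem.Chars.slice t none (some first))

def format_license_key (s : String) (k : Int) : String :=
  String.ofList (fkAcore (PySem.Chars.upper (PySem.Chars.replace s.toList ['-'] [])) k)

-- ===== PORT B =====
-- go(t): if len(t) <= k: return t; groups = -(-len(t) // k); left = len(t) - (groups // 2) * k;
--        return go(t[:left]) + "-" + go(t[left:])
-- fuel = len t totalises the recursion (for k ≥ 1 each half is strictly shorter, so fuel never runs out
-- inside Pre_; outside Pre_ the Python recursion does not terminate and nothing is claimed).
def fkGo (k : Int) : Nat → List Char → List Char
  | 0, t => t
  | fuel + 1, t =>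
    if PySem.Chars.len t ≤ k then t
    else
      let groups := -(PySem.Int.floordiv (-(PySem.Chars.len t)) k)
      let left := PySem.Chars.len t - (PySem.Int.floordiv groups 2) * k
      fkGo k fuel (PySem.Chars.slice t none (some left)) ++ '-' ::
        fkGo k fuel (PySem.Chars.slice t (some left) none)

def format_license_key_alt (s : String) (k : Int) : String :=
  let t := PySem.Chars.upper (PySem.Chars.replace s.toList ['-'] [])
  if t ≠ [] then String.ofList (fkGo k t.length t) else ""

-- ===== PRECONDITION & SPEC =====
-- Pre_ excludes k ≤ 0: at k = 0 the Python A raises ZeroDivisionError in len(s) % k (B raises it too on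
-- any non-empty cleaned string), and for k < 0 A's dash-free truncated string s[:len(s)%k] with an empty
-- loop is an accident of A's implementation on which B's natural recursion does not terminate (RecursionError).
def Pre_format_license_key (s : String) (k : Int) : Prop := 1 ≤ k
instance (s : String) (k : Int) : Decidable (Pre_format_license_key s k) := by
  unfold Pre_format_license_key; infer_instance
def pvWitness_format_license_key : String × Int := ("5F3Z-2e-9-w", 4)

def Spec_format_license_key (s : String) (k : Int) (out : String) : Prop := out = format_license_key_alt s k
instance (s : String) (k : Int) (out : String) : Decidable (Spec_format_license_key s k out) := by
  unfold Spec_format_license_key; infer_instance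

-- ===== CLAIM (what is proved, stated in full; the proofs are below) =====
def Claim_equal_format_license_key : Prop := ∀ (s : String) (k : Int), Dom_format_license_key s k → Pre_format_license_key s k → Spec_format_license_key s k (format_license_key s k)

-- ===== LEMMAS AND PROOFS =====

-- the canonical value both ports compute: leading remainder, then the k-chunks, a dash before
-- every chunk that does not start at index 0
def fkCanon (kn : Nat) (t : List Char) : List Char :=
  t.take (t.length % kn) ++ (List.range (t.length / kn)).flatMap
    (fun j => (if 0 < t.length % kn + kn * j then ['-'] else []) ++ (t.drop (t.length % kn + kn * j)).take kn)

-- A's foldl, rewritten as one flatMap with a per-index dash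
theorem fk_flatfold (chunk : Int → List Char) (is : List Int) (P : List Char) :
    is.foldl (fun r i => (if 0 < i then r ++ ['-'] else r) ++ chunk i) P
      = P ++ is.flatMap (fun i => (if 0 < i then ['-'] else []) ++ chunk i) := by
  induction is generalizing P with
  | nil => simp
  | cons i is ih => rw [List.foldl_cons, ih]; by_cases h : 0 < i <;> simp [h]

theorem fkAcore_eq_canon (t : List Char) (k : Int) (hk : 1 ≤ k) :
    fkAcore t k = fkCanon (k.toNat) t := by
  obtain ⟨kn, rfl⟩ : ∃ m : Nat, k = (m : Int) := ⟨k.toNat, by omega⟩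
  have hkpos : 1 ≤ kn := by exact_mod_cast hk
  simp only [fkAcore, fkCanon, Int.toNat_natCast]
  set n := t.length with hn
  have hmod : PySem.Int.mod (PySem.Chars.len t) (kn : Int) = ((n % kn : Nat) : Int) := by
    rw [PySem.Chars.len_eq, ← hn]
    exact_mod_cast PySem.Int.mod_natCast n kn
  have hlen : PySem.Chars.len t = (n : Int) := by rw [PySem.Chars.len_eq, hn]
  rw [hmod, hlen]
  have hfle : n % kn ≤ n := Nat.mod_le n kn
  have hcount : (if ((n % kn : Nat) : Int) < (n : Int) then
      (((n : Int) - ((n % kn : Nat) : Int) + (kn : Int) - 1) / (kn : Int)).toNat else 0) = n / kn := by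
    split_ifs with h
    · have he : (n : Int) - ((n % kn : Nat) : Int) + (kn : Int) - 1 = ((n - n % kn + kn - 1 : Nat) : Int) := by
        push_cast; omega
      have hnat : (n - n % kn + kn - 1) / kn = n / kn := by
        have h1 : n - n % kn = kn * (n / kn) := by
          have := Nat.mod_add_div n kn; omega
        rw [h1]
        have h2 : kn * (n / kn) + kn - 1 = kn - 1 + kn * (n / kn) := by omega
        rw [h2, Nat.add_mul_div_left _ _ (by omega : 0 < kn),
          Nat.div_eq_of_lt (by omega)]
        omega
      rw [he, ← Int.natCast_div, Int.toNat_natCast, hnat]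
    · have hlt : n < kn := by
        by_contra hge
        have : n % kn < n := by
          have := Nat.mod_lt n (y := kn) (by omega)
          omega
        exact h (by exact_mod_cast this)
      rw [Nat.div_eq_of_lt hlt]
  rw [PySem.List.pyRange_of_pos _ _ (by exact_mod_cast hkpos : (0:Int) < (kn : Int)), hcount]
  rw [fk_flatfold, List.flatMap_map]
  congr 1
  · rw [PySem.Chars.slice_eq_listSlice, PySem.List.slice_to_natCast]
  · apply List.flatMap_congr
    intro j _
    have hidx : ((n % kn : Nat) : Int) + (kn : Int) * (j : Int) = ((n % kn + kn * j : Nat) : Int) := by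
      push_cast; ring
    rw [hidx]
    congr 1
    · by_cases h0 : 0 < n % kn + kn * j
      · rw [if_pos (by exact_mod_cast h0 : (0:Int) < ((n % kn + kn * j : Nat) : Int)), if_pos h0]
      · rw [if_neg (by exact_mod_cast h0), if_neg h0]
    · rw [PySem.Chars.slice_eq_listSlice, PySem.List.slice_natCast_add]

theorem fkCanon_small (kn : Nat) (t : List Char) (hk : 1 ≤ kn) (h : t.length ≤ kn) :
    fkCanon kn t = t := by
  by_cases hlt : t.length < kn
  · simp [fkCanon, Nat.mod_eq_of_lt hlt, Nat.div_eq_of_lt hlt]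
  · have he : t.length = kn := by omega
    simp [fkCanon, he, Nat.mod_self, Nat.div_self (by omega : 0 < kn),
      List.range_succ, List.take_of_length_le (le_of_eq he)]

theorem fkCanon_split (kn : Nat) (t : List Char) (left r : Nat) (hk : 1 ≤ kn)
    (hsum : left + r = t.length) (hl : 1 ≤ left) (hd : kn ∣ r) (hr : 1 ≤ r) :
    fkCanon kn t = fkCanon kn (t.take left) ++ '-' :: fkCanon kn (t.drop left) := by
  obtain ⟨m2, rfl⟩ := hd
  have hm2 : 1 ≤ m2 := Nat.pos_of_ne_zero (fun h => by simp [h] at hr)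
  obtain ⟨d, rfl⟩ : ∃ d, m2 = d + 1 := ⟨m2 - 1, by omega⟩
  have hleft_le : left ≤ t.length := by omega
  have hmod_eq : t.length % kn = left % kn := by
    rw [← hsum]; exact Nat.add_mul_mod_self_left left kn (d + 1)
  have hdiv_eq : t.length / kn = left / kn + (d + 1) := by
    rw [← hsum]; exact Nat.add_mul_div_left left (d + 1) (by omega)
  have hfm : left % kn + kn * (left / kn) = left := Nat.mod_add_div left kn
  have hfle : left % kn ≤ left := Nat.mod_le left kn
  have hTake : fkCanon kn (t.take left)
      = t.take (left % kn) ++ (List.range (left / kn)).flatMap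
          (fun j => (if 0 < left % kn + kn * j then ['-'] else []) ++ (t.drop (left % kn + kn * j)).take kn) := by
    simp only [fkCanon, List.length_take, Nat.min_eq_left hleft_le]
    congr 1
    · rw [List.take_take, Nat.min_eq_left hfle]
    · apply List.flatMap_congr
      intro j hj
      congr 1
      have hb : left % kn + kn * j + kn ≤ left := by
        rw [List.mem_range] at hj
        calc left % kn + kn * j + kn = left % kn + kn * (j + 1) := by ring
          _ ≤ left % kn + kn * (left / kn) := by
              have : j + 1 ≤ left / kn := hj
              exact Nat.add_le_add_left (Nat.mul_le_mul_left kn this) _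
          _ = left := hfm
      rw [List.drop_take, List.take_take, Nat.min_eq_left (by omega)]
  have hDrop : fkCanon kn (t.drop left)
      = (List.range (d + 1)).flatMap
          (fun j => (if 0 < kn * j then ['-'] else []) ++ (t.drop (left + kn * j)).take kn) := by
    simp only [fkCanon, List.length_drop]
    have hnl : t.length - left = kn * (d + 1) := by omega
    rw [hnl, Nat.mul_mod_right, Nat.mul_div_cancel_left _ (by omega : 0 < kn)]
    simp only [List.take_zero, List.nil_append, Nat.zero_add]
    apply List.flatMap_congr
    intro j _
    congr 1
    rw [List.drop_drop]
  rw [hTake, hDrop]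
  simp only [fkCanon]
  rw [hmod_eq, hdiv_eq, List.range_add, List.flatMap_append, List.flatMap_map,
    List.append_assoc]
  congr 1
  congr 1
  have hF : ∀ j : Nat,
      ((if 0 < left % kn + kn * (left / kn + j) then ['-'] else [])
        ++ (t.drop (left % kn + kn * (left / kn + j))).take kn)
      = '-' :: (t.drop (left + kn * j)).take kn := by
    intro j
    have hidx : left % kn + kn * (left / kn + j) = left + kn * j := by
      rw [Nat.mul_add, ← Nat.add_assoc, hfm]
    rw [hidx, if_pos (by omega)]
    rfl
  rw [List.range_succ_eq_map]
  simp only [List.flatMap_cons, List.flatMap_map, Nat.succ_eq_add_one]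
  rw [hF 0, if_neg (by simp : ¬ 0 < kn * 0)]
  simp only [Nat.add_zero, Nat.mul_zero, List.nil_append, List.cons_append]
  congr 1
  congr 1
  apply List.flatMap_congr
  intro j _
  rw [hF (j + 1), if_pos (by positivity : 0 < kn * (j + 1))]
  rfl

-- ceil(n/kn) as the integer q with (q-1)*kn < n ≤ q*kn (what -(-n // kn) computes)
theorem fk_ceil (kn n : Nat) (h0 : 0 < kn) (hnk : kn < n) :
    ∃ gn : Nat, ((gn : Int) - 1) * (kn : Int) < (n : Int) ∧ (n : Int) ≤ (gn : Int) * (kn : Int) ∧ 2 ≤ gn := by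
  have hmd := Nat.mod_add_div n kn
  have hm1 : 1 ≤ n / kn := (Nat.one_le_div_iff h0).mpr hnk.le
  have hflt : n % kn < kn := Nat.mod_lt _ h0
  have hmdZ : ((n % kn : Nat) : Int) + (kn : Int) * ((n / kn : Nat) : Int) = (n : Int) := by
    exact_mod_cast hmd
  by_cases hz : n % kn = 0
  · refine ⟨n / kn, ?_, ?_, ?_⟩
    · have hzZ : ((n % kn : Nat) : Int) = 0 := by exact_mod_cast hz
      nlinarith [hmdZ, (by exact_mod_cast h0 : (0:Int) < (kn:Int))]
    · have hzZ : ((n % kn : Nat) : Int) = 0 := by exact_mod_cast hz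
      nlinarith [hmdZ]
    · by_contra hlt
      have h1 : kn * (n / kn) ≤ kn * 1 := Nat.mul_le_mul_left kn (by omega)
      have h2 : kn * 1 = kn := Nat.mul_one kn
      linarith [hmd, h1, h2]
  · refine ⟨n / kn + 1, ?_, ?_, ?_⟩
    · have hzZ : (0:Int) < ((n % kn : Nat) : Int) := by exact_mod_cast Nat.pos_of_ne_zero hz
      rw [Nat.cast_add, Nat.cast_one]
      nlinarith [hmdZ]
    · have hzZ : ((n % kn : Nat) : Int) ≤ (kn : Int) := by exact_mod_cast hflt.le
      rw [Nat.cast_add, Nat.cast_one]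
      nlinarith [hmdZ]
    · omega

theorem fkGo_eq_canon (k : Int) (hk : 1 ≤ k) (fuel : Nat) (t : List Char)
    (hf : t.length ≤ fuel) : fkGo k fuel t = fkCanon (k.toNat) t := by
  obtain ⟨kn, rfl⟩ : ∃ m : Nat, k = (m : Int) := ⟨k.toNat, by omega⟩
  have hkpos : 1 ≤ kn := by exact_mod_cast hk
  have h0 : (0:Nat) < kn := by omega
  simp only [Int.toNat_natCast]
  clear hk
  induction fuel generalizing t with
  | zero =>
    have ht : t = [] := List.eq_nil_of_length_eq_zero (by omega)
    subst ht
    simp [fkGo, fkCanon]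
  | succ fuel ih =>
    simp only [fkGo, PySem.Chars.len_eq]
    by_cases hsm : (t.length : Int) ≤ (kn : Int)
    · rw [if_pos hsm, fkCanon_small kn t hkpos (by exact_mod_cast hsm)]
    · rw [if_neg hsm]
      have hnk : kn < t.length := by exact_mod_cast not_le.mp hsm
      obtain ⟨gn, hb1, hb2, hg2⟩ := fk_ceil kn t.length h0 hnk
      have hgn : -(PySem.Int.floordiv (-(t.length : Int)) (kn : Int)) = (gn : Int) := by
        rw [PySem.Int.neg_floordiv_neg_eq_iff_of_pos (by exact_mod_cast h0)]
        exact ⟨hb1, hb2⟩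
      have hhalf : PySem.Int.floordiv (gn : Int) 2 = ((gn / 2 : Nat) : Int) := by
        rw [PySem.Int.floordiv_eq_ediv_of_pos (by norm_num)]
        omega
      have hb1' : (gn - 1) * kn < t.length := by
        zify [show (1:Nat) ≤ gn by omega]
        exact hb1
      have hr_lt : gn / 2 * kn < t.length := by
        calc gn / 2 * kn ≤ (gn - 1) * kn := Nat.mul_le_mul_right kn (by omega)
          _ < t.length := hb1'
      have hr_pos : 1 ≤ gn / 2 * kn := Nat.mul_pos (by omega) h0
      have hleft : (t.length : Int) - ((gn / 2 : Nat) : Int) * (kn : Int)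
          = ((t.length - gn / 2 * kn : Nat) : Int) := by
        rw [Nat.cast_sub hr_lt.le, Nat.cast_mul]
      rw [hgn, hhalf, hleft]
      rw [PySem.Chars.slice_eq_listSlice, PySem.Chars.slice_eq_listSlice,
        PySem.List.slice_to_natCast, PySem.List.slice_from_natCast]
      rw [ih (t.take (t.length - gn / 2 * kn)) (by
        rw [List.length_take]
        omega)]
      rw [ih (t.drop (t.length - gn / 2 * kn)) (by
        rw [List.length_drop]
        omega)]
      exact (fkCanon_split kn t (t.length - gn / 2 * kn) (gn / 2 * kn) hkpos
        (by omega) (by omega) ⟨gn / 2, by ring⟩ hr_pos).symm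

-- ===== VERDICT (by name: the statement is the Claim_ definition above) =====
theorem format_license_key_spec : Claim_equal_format_license_key := by
  intro s k _ hk
  unfold Spec_format_license_key format_license_key format_license_key_alt
  set t := PySem.Chars.upper (PySem.Chars.replace s.toList ['-'] []) with ht
  by_cases h : t = []
  · rw [if_neg (by simp [h]), h]
    rw [fkAcore_eq_canon _ _ hk]
    simp [fkCanon]
  · rw [if_pos h, fkAcore_eq_canon _ _ hk, fkGo_eq_canon k hk t.length t le_rfl]
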